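-- pv_equiv track=rewrite | github.com/pamapa/callblocker | usr/share/callblocker/import_CSV.py | _get_entity_person
-- ===== SOURCE A (Python) =====
-- def _get_entity_person(fields):
--     name = ""
--     # first name
--     for field_name in fields:
--         if field_name and field_name.lower().find("first name") != -1:
--             name += " " + fields[field_name]
--             break
--     # middle name
--     for field_name in fields:
--         if field_name and field_name.lower().find("middle name") != -1:
--             name += " " + fields[field_name]
--             break
--     # last name
--     for field_name in fields:
--         if field_name and field_name.lower().find("last name") != -1:
--             name += " " + fields[field_name]
--             break
--     # tellows: name
--     if "Score" in fields and "Anruftyp" in fields: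
--         name = "%s / score:%s" % (fields["Anruftyp"], fields["Score"])
--     return name.strip()
-- ===== SOURCE B (Python) =====
-- def _get_entity_person(fields):
--     first = middle = last = None
--     for field_name in fields:
--         if not field_name:
--             continue
--         low = field_name.lower()
--         if first is None and "first name" in low:
--             first = fields[field_name]
--         if middle is None and "middle name" in low:
--             middle = fields[field_name]
--         if last is None and "last name" in low:
--             last = fields[field_name]
--     if "Score" in fields and "Anruftyp" in fields:
--         return ("%s / score:%s" % (fields["Anruftyp"], fields["Score"])).strip()
--     return " ".join(v for v in (first, middle, last) if v is not None).strip()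
-- ===== Notes on version B (the rewrite author's own statement) =====
-- stated objective: faster
-- what changed: Replaces A's three separate scans over the field names (one per name part, each with its own break and per-key dict lookup) by a single pass that fills three first-wins slots, then emits the present parts via ' '.join in first/middle/last order; the tellows override and final strip are kept.
import Mathlib
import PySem

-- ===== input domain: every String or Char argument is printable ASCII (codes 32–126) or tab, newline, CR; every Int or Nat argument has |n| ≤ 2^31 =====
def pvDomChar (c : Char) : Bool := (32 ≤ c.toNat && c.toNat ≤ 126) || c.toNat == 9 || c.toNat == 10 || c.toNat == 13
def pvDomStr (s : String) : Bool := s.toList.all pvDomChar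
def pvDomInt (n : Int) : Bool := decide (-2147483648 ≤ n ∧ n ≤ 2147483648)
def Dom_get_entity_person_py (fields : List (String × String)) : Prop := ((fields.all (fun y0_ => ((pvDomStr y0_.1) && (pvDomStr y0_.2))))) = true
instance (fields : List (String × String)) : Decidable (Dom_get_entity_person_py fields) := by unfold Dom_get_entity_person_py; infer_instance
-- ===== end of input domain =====

-- B replaces A's three scans over the keys by a single pass that records the three
-- name parts in first-wins slots, then joins the present parts; same return value.

-- shared dict primitives: fields[k] (keys looked up are always present) and 'k in fields'
def pyLookup (fields : List (String × String)) (k : String) : String :=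
  (((fields.find? (fun p => p.1 == k)).map Prod.snd).getD "")

def pyContains (fields : List (String × String)) (k : String) : Bool :=
  fields.any (fun p => p.1 == k)

-- ===== PORT A =====
-- one of A's three identical 'for field_name in fields: … break' loops (sub is the literal searched for)
def nameLoopA (fields : List (String × String)) (sub : String) : List String → String
  | [] => ""
  | k :: rest =>
    if k ≠ "" ∧ PySem.Str.find (PySem.Str.lower k) sub ≠ -1 then
      " " ++ pyLookup fields k
    else nameLoopA fields sub rest

def get_entity_person_py (fields : List (String × String)) : String :=
  let keys := fields.map Prod.fst
  let name := ""
  let name := name ++ nameLoopA fields "first name" keys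
  let name := name ++ nameLoopA fields "middle name" keys
  let name := name ++ nameLoopA fields "last name" keys
  let name := if pyContains fields "Score" && pyContains fields "Anruftyp" then
      pyLookup fields "Anruftyp" ++ " / score:" ++ pyLookup fields "Score"
    else name
  PySem.Str.strip name

-- ===== PORT B =====
-- B's single loop over the keys, carrying the three first-wins slots
def scanB (fields : List (String × String)) :
    List String → Option String → Option String → Option String →
    Option String × Option String × Option String
  | [], f, m, l => (f, m, l)
  | k :: rest, f, m, l =>
    if k = "" then scanB fields rest f m l
    else
      let low := PySem.Str.lower k
      let f' := if f.isNone && PySem.Str.isIn "first name" low then some (pyLookup fields k) else f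
      let m' := if m.isNone && PySem.Str.isIn "middle name" low then some (pyLookup fields k) else m
      let l' := if l.isNone && PySem.Str.isIn "last name" low then some (pyLookup fields k) else l
      scanB fields rest f' m' l'

def get_entity_person_py_alt (fields : List (String × String)) : String :=
  let (f, m, l) := scanB fields (fields.map Prod.fst) none none none
  if pyContains fields "Score" && pyContains fields "Anruftyp" then
    PySem.Str.strip (pyLookup fields "Anruftyp" ++ " / score:" ++ pyLookup fields "Score")
  else
    PySem.Str.strip (PySem.Str.join " " ([f, m, l].filterMap id))

-- ===== PRECONDITION & SPEC =====
def Spec_get_entity_person_py (fields : List (String × String)) (out : String) : Prop := out = get_entity_person_py_alt fields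
instance (fields : List (String × String)) (out : String) : Decidable (Spec_get_entity_person_py fields out) := by unfold Spec_get_entity_person_py; infer_instance

-- ===== CLAIM (what is proved, stated in full; the proofs are below) =====
def Claim_equal_get_entity_person_py : Prop := ∀ (fields : List (String × String)), Dom_get_entity_person_py fields → Spec_get_entity_person_py fields (get_entity_person_py fields)

-- ===== LEMMAS AND PROOFS =====

-- the value of one of A's loops, as an optional part: the value of the first matching key
def optFind (fields : List (String × String)) (sub : String) : List String → Option String
  | [] => none
  | k :: rest =>
    if k ≠ "" ∧ PySem.Str.find (PySem.Str.lower k) sub ≠ -1 then some (pyLookup fields k)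
    else optFind fields sub rest

lemma nameLoopA_eq_optFind (fields : List (String × String)) (sub : String) (keys : List String) :
    nameLoopA fields sub keys = (optFind fields sub keys).elim "" (" " ++ ·) := by
  induction keys with
  | nil => rfl
  | cons k rest ih =>
    simp only [nameLoopA, optFind]
    split <;> simp [ih]

lemma isIn_iff_find_ne (sub s : String) :
    PySem.Str.isIn sub s = true ↔ PySem.Str.find s sub ≠ -1 := by
  rw [PySem.Str.isIn_iff_infix, PySem.Str.find_ne_neg_one_iff]

lemma scanB_eq (fields : List (String × String)) (keys : List String)
    (f m l : Option String) :
    scanB fields keys f m l =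
      ((f.or (optFind fields "first name" keys),
        m.or (optFind fields "middle name" keys),
        l.or (optFind fields "last name" keys)) :
        Option String × Option String × Option String) := by
  induction keys generalizing f m l with
  | nil => simp [scanB, optFind]
  | cons k rest ih =>
    by_cases hk : k = ""
    · simp [scanB, optFind, hk, ih]
    · have step : ∀ (sub : String) (o : Option String),
          ((if o.isNone && PySem.Str.isIn sub (PySem.Str.lower k) then some (pyLookup fields k)
              else o).or (optFind fields sub rest))
            = o.or (optFind fields sub (k :: rest)) := by
        intro sub o
        by_cases hin : PySem.Str.isIn sub (PySem.Str.lower k) = true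
        · have hf : PySem.Str.find (PySem.Str.lower k) sub ≠ -1 := (isIn_iff_find_ne _ _).mp hin
          cases o <;> simp only [optFind, if_pos (And.intro hk hf), hin, Option.isNone] <;> simp
        · have hf : ¬ (k ≠ "" ∧ PySem.Str.find (PySem.Str.lower k) sub ≠ -1) := by
            intro hc
            exact hin ((isIn_iff_find_ne _ _).mpr hc.2)
          have hin' : PySem.Str.isIn sub (PySem.Str.lower k) = false := by
            simpa using hin
          cases o <;> simp only [optFind, if_neg hf, hin', Option.isNone] <;> simp
      simp only [scanB, if_neg hk, ih]
      simp only [Prod.mk.injEq]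
      exact ⟨step _ f, step _ m, step _ l⟩

lemma strip_space_cons (cs : List Char) :
    PySem.Chars.strip (' ' :: cs) = PySem.Chars.strip cs := by
  simp [PySem.Chars.strip, PySem.Chars.lstrip, List.dropWhile]
  rfl

lemma strip_parts (f m l : Option String) :
    PySem.Str.strip ((f.elim "" (" " ++ ·)) ++ (m.elim "" (" " ++ ·)) ++ (l.elim "" (" " ++ ·)))
      = PySem.Str.strip (PySem.Str.join " " ([f, m, l].filterMap id)) := by
  rcases f with _ | v1 <;> rcases m with _ | v2 <;> rcases l with _ | v3 <;>
    apply String.toList_inj.mp <;>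
    simp [PySem.Str.toList_strip, PySem.Str.toList_join, String.toList_append,
      PySem.Chars.join, List.intercalate, strip_space_cons]

-- ===== VERDICT (by name: the statement is the Claim_ definition above) =====
theorem get_entity_person_py_spec : Claim_equal_get_entity_person_py := by
  unfold Claim_equal_get_entity_person_py
  intro fields _
  unfold Spec_get_entity_person_py
  unfold get_entity_person_py get_entity_person_py_alt
  rw [scanB_eq]
  by_cases h : (pyContains fields "Score" && pyContains fields "Anruftyp") = true
  · simp [h]
  · rw [Bool.not_eq_true] at h
    simp only [h, if_false, Bool.false_eq_true]
    simp only [nameLoopA_eq_optFind, Option.none_or]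
    have := strip_parts (optFind fields "first name" (fields.map Prod.fst))
      (optFind fields "middle name" (fields.map Prod.fst))
      (optFind fields "last name" (fields.map Prod.fst))
    simpa using this
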